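-- pv_equiv track=rewrite | github.com/JPC-AV/video_qc_jpc_av | src/AV_Spex/utils/config_io.py | _resolve_profile_name_collision
-- ===== SOURCE A (Python) =====
-- from typing import Optional, Union, List, Tuple
--
-- def _resolve_profile_name_collision(desired_name: str,
--                                      existing_names: set) -> Tuple[str, bool]:
--     """
--     Resolve a name collision by appending '(imported)' suffix.
--
--     If the suffixed name also collides, appends a numeric counter.
--
--     Args:
--         desired_name: The original profile name from the import file
--         existing_names: Set of profile names already present locally
--
--     Returns:
--         Tuple of (resolved_name, was_renamed)
--     """
--     if desired_name not in existing_names: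
--         return desired_name, False
--
--     # Try with (imported) suffix
--     candidate = f"{desired_name} (imported)"
--     if candidate not in existing_names:
--         return candidate, True
--
--     # Fallback: add numeric counter
--     counter = 2
--     while f"{desired_name} (imported {counter})" in existing_names:
--         counter += 1
--     return f"{desired_name} (imported {counter})", True
-- ===== SOURCE B (Python) =====
-- def _resolve_profile_name_collision(desired_name, existing_names):
--     # One pass over existing_names builds an index (bare? suffixed? set of used
--     # counter strings); the answer is then computed from the index (mex over the
--     # used-counter set) instead of probing candidate names against the set.
--     prefix = desired_name + " (imported "
--     bare = False
--     suffixed = False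
--     used = set()
--     for name in existing_names:
--         if name == desired_name:
--             bare = True
--         elif name == desired_name + " (imported)":
--             suffixed = True
--         elif name.startswith(prefix) and name.endswith(")"):
--             used.add(name[len(prefix):-1])
--     if not bare:
--         return desired_name, False
--     if not suffixed:
--         return desired_name + " (imported)", True
--     counter = 2
--     while str(counter) in used:
--         counter += 1
--     return f"{desired_name} (imported {counter})", True
-- ===== Notes on version B (the rewrite author's own statement) =====
-- stated objective: alternative
-- what changed: Instead of A's probe-candidates-until-free strategy (test name, then suffixed name, then numbered names one by one against the set), B makes a single indexing pass over existing_names that records whether the bare and suffixed names occur and parses every 'name (imported <k>)' entry into a set of used counter strings, then computes the answer from that index (mex over the used-counter set).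
import Mathlib
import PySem

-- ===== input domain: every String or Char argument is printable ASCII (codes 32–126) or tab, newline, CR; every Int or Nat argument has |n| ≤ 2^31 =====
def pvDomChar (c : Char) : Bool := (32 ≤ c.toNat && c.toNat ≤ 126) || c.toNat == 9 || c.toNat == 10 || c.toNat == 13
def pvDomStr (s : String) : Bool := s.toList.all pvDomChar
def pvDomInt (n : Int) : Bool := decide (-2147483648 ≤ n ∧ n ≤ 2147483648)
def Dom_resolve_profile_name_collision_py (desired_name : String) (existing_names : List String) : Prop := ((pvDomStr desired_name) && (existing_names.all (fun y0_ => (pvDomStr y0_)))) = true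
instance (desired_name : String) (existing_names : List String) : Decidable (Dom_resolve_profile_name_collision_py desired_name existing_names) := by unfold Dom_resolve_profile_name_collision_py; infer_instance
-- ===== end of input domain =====

-- B replaces A's probe-candidates-until-free strategy by a single indexing pass over
-- existing_names (bare?/suffixed?/set of used counter strings) followed by a mex
-- computation over the used-counter set; same results, different algorithm.


-- ===== PORT A =====
-- A's 'while f"... {counter}" in existing_names: counter += 1' loop; the fuel
-- |existing_names| + 1 only makes the recursion total (the numbered candidates are
-- pairwise distinct strings, so at most |existing_names| of them can be members).
def pvALoop (d : String) (ex : List String) : Nat → Nat → Nat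
  | 0, c => c
  | fuel + 1, c =>
    if (d ++ " (imported " ++ PySem.Int.toStr (c : Int) ++ ")") ∈ ex then
      pvALoop d ex fuel (c + 1)
    else c

def resolve_profile_name_collision_py (desired_name : String) (existing_names : List String) : String × Bool :=
  if desired_name ∉ existing_names then
    (desired_name, false)
  else if (desired_name ++ " (imported)") ∉ existing_names then
    (desired_name ++ " (imported)", true)
  else
    (desired_name ++ " (imported " ++
      PySem.Int.toStr ((pvALoop desired_name existing_names (existing_names.length + 1) 2 : Nat) : Int) ++ ")", true)

-- ===== PORT B =====
-- B's indexing pass: one step of 'for name in existing_names' updating the state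
-- (bare, suffixed, used); used is a Python set of the sliced-out counter strings.
def pvStep (d p : String) (st : Bool × Bool × PySem.Set String) (name : String) : Bool × Bool × PySem.Set String :=
  if name == d then (true, st.2.1, st.2.2)
  else if name == d ++ " (imported)" then (st.1, true, st.2.2)
  else if PySem.Str.startswith name p && PySem.Str.endswith name ")" then
    (st.1, st.2.1, PySem.Set.add st.2.2 (PySem.Str.slice name (some (PySem.Str.len p)) (some (-1))))
  else st

-- B's 'while str(counter) in used: counter += 1'; fuel |existing_names| + 1 makes it
-- total (used holds at most |existing_names| strings and str is injective on counters).
def pvMex (used : PySem.Set String) : Nat → Nat → Nat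
  | 0, c => c
  | fuel + 1, c =>
    if PySem.Set.contains used (PySem.Int.toStr (c : Int)) then pvMex used fuel (c + 1) else c

-- B's tail: turn the index built by the pass into the returned pair.
def pvFromIndex (d : String) (ex : List String) (st : Bool × Bool × PySem.Set String) : String × Bool :=
  if !st.1 then (d, false)
  else if !st.2.1 then (d ++ " (imported)", true)
  else
    (d ++ " (imported " ++ PySem.Int.toStr ((pvMex st.2.2 (ex.length + 1) 2 : Nat) : Int) ++ ")", true)

def resolve_profile_name_collision_py_alt (desired_name : String) (existing_names : List String) : String × Bool :=
  pvFromIndex desired_name existing_names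
    (existing_names.foldl (pvStep desired_name (desired_name ++ " (imported ")) (false, false, PySem.Set.empty))

-- ===== PRECONDITION & SPEC =====
def Spec_resolve_profile_name_collision_py (desired_name : String) (existing_names : List String) (out : String × Bool) : Prop := out = resolve_profile_name_collision_py_alt desired_name existing_names
instance (desired_name : String) (existing_names : List String) (out : String × Bool) : Decidable (Spec_resolve_profile_name_collision_py desired_name existing_names out) := by unfold Spec_resolve_profile_name_collision_py; infer_instance

-- ===== CLAIM (what is proved, stated in full; the proofs are below) =====
def Claim_equal_resolve_profile_name_collision_py : Prop := ∀ (desired_name : String) (existing_names : List String), Dom_resolve_profile_name_collision_py desired_name existing_names → Spec_resolve_profile_name_collision_py desired_name existing_names (resolve_profile_name_collision_py desired_name existing_names)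

-- ===== LEMMAS AND PROOFS =====

lemma pv_append_ne (d s : String) (h : s.toList ≠ []) : d ++ s ≠ d := by
  intro he
  have h2 := congrArg (fun x => x.toList.length) he
  simp only [String.toList_append, List.length_append] at h2
  have : s.toList.length = 0 := by omega
  exact h (List.length_eq_zero_iff.mp this)

-- the fold's first component is 'desired_name seen'
lemma pv_fold_bare (d p : String) (ex : List String) :
    ∀ st : Bool × Bool × PySem.Set String,
      (ex.foldl (pvStep d p) st).1 = (st.1 || decide (d ∈ ex)) := by
  induction ex with
  | nil => intro st; simp
  | cons name ex ih =>
    intro st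
    simp only [List.foldl_cons, ih]
    by_cases h1 : name = d
    · subst h1
      simp [pvStep, List.mem_cons]
    · have h1' : ¬ d = name := fun h => h1 h.symm
      have hstep : (pvStep d p st name).1 = st.1 := by
        unfold pvStep; split_ifs with hA hB hC <;> simp_all
      have hm : decide (d ∈ name :: ex) = decide (d ∈ ex) :=
        decide_eq_decide.mpr (by simp [List.mem_cons, h1'])
      rw [hstep, hm]

-- the fold's second component is 'suffixed name seen'
lemma pv_fold_suff (d p : String) (ex : List String) :
    ∀ st : Bool × Bool × PySem.Set String,
      (ex.foldl (pvStep d p) st).2.1 = (st.2.1 || decide ((d ++ " (imported)") ∈ ex)) := by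
  induction ex with
  | nil => intro st; simp
  | cons name ex ih =>
    intro st
    simp only [List.foldl_cons, ih]
    by_cases h2 : name = d ++ " (imported)"
    · subst h2
      have hne : d ++ " (imported)" ≠ d := pv_append_ne d " (imported)" (by decide)
      have hb1 : ((d ++ " (imported)") == d) = false := beq_eq_false_iff_ne.mpr hne
      have hstep : (pvStep d p st (d ++ " (imported)")).2.1 = true := by
        unfold pvStep
        rw [hb1, beq_self_eq_true]
        simp
      rw [hstep, decide_eq_true (List.mem_cons_self : (d ++ " (imported)") ∈ _ :: ex)]
      simp
    · have h2' : ¬ (d ++ " (imported)") = name := fun h => h2 h.symm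
      have hstep : (pvStep d p st name).2.1 = st.2.1 := by
        unfold pvStep; split_ifs with hA hB hC <;> simp_all
      have hm : decide ((d ++ " (imported)") ∈ name :: ex) = decide ((d ++ " (imported)") ∈ ex) :=
        decide_eq_decide.mpr (by simp [List.mem_cons, h2'])
      rw [hstep, hm]

def pvHit (d p name : String) : Prop :=
  name ≠ d ∧ name ≠ d ++ " (imported)" ∧
    (PySem.Str.startswith name p && PySem.Str.endswith name ")") = true

-- the fold's third component holds exactly the sliced-out counter strings
lemma pv_fold_used (d p : String) (ex : List String) :
    ∀ (st : Bool × Bool × PySem.Set String) (s : String),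
      s ∈ (ex.foldl (pvStep d p) st).2.2 ↔
        s ∈ st.2.2 ∨ ∃ nm ∈ ex, pvHit d p nm ∧
          PySem.Str.slice nm (some (PySem.Str.len p)) (some (-1)) = s := by
  induction ex with
  | nil => intro st s; simp
  | cons name ex ih =>
    intro st s
    simp only [List.foldl_cons, ih,
      List.exists_mem_cons_iff (fun nm => pvHit d p nm ∧ PySem.Str.slice nm (some (PySem.Str.len p)) (some (-1)) = s)]
    by_cases h1 : name = d
    · have hstep : (pvStep d p st name).2.2 = st.2.2 := by unfold pvStep; simp [h1]
      have hP : ¬ (pvHit d p name ∧ PySem.Str.slice name (some (PySem.Str.len p)) (some (-1)) = s) :=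
        fun h => h.1.1 h1
      rw [hstep]
      exact ⟨fun h => h.elim Or.inl (fun h => Or.inr (Or.inr h)),
        fun h => h.elim Or.inl (fun h => h.elim (fun h => absurd h hP) (fun h => Or.inr h))⟩
    · by_cases h2 : name = d ++ " (imported)"
      · have hstep : (pvStep d p st name).2.2 = st.2.2 := by unfold pvStep; simp [h2]
        have hP : ¬ (pvHit d p name ∧ PySem.Str.slice name (some (PySem.Str.len p)) (some (-1)) = s) :=
          fun h => h.1.2.1 h2
        rw [hstep]
        exact ⟨fun h => h.elim Or.inl (fun h => Or.inr (Or.inr h)),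
          fun h => h.elim Or.inl (fun h => h.elim (fun h => absurd h hP) (fun h => Or.inr h))⟩
      · by_cases h3 : (PySem.Str.startswith name p && PySem.Str.endswith name ")") = true
        · have h3' := h3
          rw [Bool.and_eq_true, PySem.Str.startswith_eq, PySem.Str.endswith_eq,
            show (")" : String).toList = [')'] from rfl] at h3'
          have hstep : (pvStep d p st name).2.2
              = PySem.Set.add st.2.2 (PySem.Str.slice name (some (PySem.Str.len p)) (some (-1))) := by
            unfold pvStep; simp [h1, h2, h3'.1, h3'.2]
          have hP : pvHit d p name := ⟨h1, h2, h3⟩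
          rw [hstep, PySem.Set.mem_add]
          constructor
          · rintro (h | h)
            · rcases h with h | h
              · exact Or.inl h
              · exact Or.inr (Or.inl ⟨hP, h.symm⟩)
            · exact Or.inr (Or.inr h)
          · rintro (h | h | h)
            · exact Or.inl (Or.inl h)
            · exact Or.inl (Or.inr h.2.symm)
            · exact Or.inr h
        · have h3' : ¬ (PySem.Chars.startswith name.toList p.toList = true
              ∧ PySem.Chars.endswith name.toList [')'] = true) := by
            intro hcon
            apply h3
            rw [Bool.and_eq_true, PySem.Str.startswith_eq, PySem.Str.endswith_eq,
              show (")" : String).toList = [')'] from rfl]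
            exact hcon
          have hstep : (pvStep d p st name).2.2 = st.2.2 := by unfold pvStep; simp [h1, h2, h3']
          have hP : ¬ (pvHit d p name ∧ PySem.Str.slice name (some (PySem.Str.len p)) (some (-1)) = s) :=
            fun h => h3 h.1.2.2
          rw [hstep]
          exact ⟨fun h => h.elim Or.inl (fun h => Or.inr (Or.inr h)),
            fun h => h.elim Or.inl (fun h => h.elim (fun h => absurd h hP) (fun h => Or.inr h))⟩

-- xs[a:-1] for a natural a ≤ |xs| is drop-then-dropLast
lemma pv_slice_nat_neg_one {α : Type} (xs : List α) (a : Nat) (h : a ≤ xs.length) :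
    PySem.List.slice xs (some (a : Int)) (some (-1)) = (xs.drop a).dropLast := by
  simp only [PySem.List.slice, PySem.List.clampIdx_natCast, PySem.List.clampIdx_neg_one,
    Nat.min_eq_left h]
  rw [List.dropLast_eq_take, List.length_drop]
  congr 1
  omega

-- slicing the rendered candidate recovers the counter string
lemma pv_slice_render (d s : String) :
    PySem.Str.slice (d ++ " (imported " ++ s ++ ")") (some (PySem.Str.len (d ++ " (imported "))) (some (-1))
      = s := by
  apply String.toList_injective
  rw [PySem.Str.toList_slice, PySem.Str.len_eq, PySem.Chars.slice_eq_listSlice]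
  rw [show (d ++ " (imported " ++ s ++ ")").toList
      = (d ++ " (imported ").toList ++ (s.toList ++ [')']) from by simp [String.toList_append]]
  rw [pv_slice_nat_neg_one _ _ (by simp), List.drop_left, List.dropLast_concat]

-- the bridge: str(c) ∈ used  ↔  the rendered numbered candidate ∈ existing_names
lemma pv_used_iff (d : String) (ex : List String) (c : Nat) :
    (PySem.Int.toStr (c : Int))
        ∈ (ex.foldl (pvStep d (d ++ " (imported ")) (false, false, PySem.Set.empty)).2.2 ↔
      (d ++ " (imported " ++ PySem.Int.toStr (c : Int) ++ ")") ∈ ex := by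
  rw [pv_fold_used]
  simp only [PySem.Set.empty, List.not_mem_nil, false_or]
  constructor
  · rintro ⟨nm, hn, ⟨h1, h2, h3⟩, hs⟩
    rw [Bool.and_eq_true, PySem.Str.startswith_eq, PySem.Str.endswith_eq,
      PySem.Chars.startswith_iff, PySem.Chars.endswith_iff] at h3
    obtain ⟨⟨rest, hrest⟩, t, ht⟩ := h3
    have hgl : nm.toList.getLast? = some ')' := by
      rw [← ht, show (")" : String).toList = [')'] from rfl, List.getLast?_concat]
    rcases List.eq_nil_or_concat rest with rfl | ⟨mid, z, rfl⟩
    · exfalso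
      rw [← hrest, List.append_nil,
        show (d ++ " (imported ").toList = d.toList ++ " (imported ".toList from by
          simp [String.toList_append],
        List.getLast?_append,
        show (" (imported " : String).toList.getLast? = some ' ' from by decide] at hgl
      simp at hgl
    · rw [List.concat_eq_append] at hrest
      have hz : z = ')' := by
        rw [← hrest, ← List.append_assoc, List.getLast?_concat] at hgl
        exact Option.some_inj.mp hgl
      have hsl := congrArg String.toList hs
      rw [PySem.Str.toList_slice, PySem.Str.len_eq, PySem.Chars.slice_eq_listSlice, ← hrest,
        pv_slice_nat_neg_one _ _ (by simp), List.drop_left, List.dropLast_concat] at hsl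
      have hname : nm = d ++ " (imported " ++ PySem.Int.toStr (c : Int) ++ ")" := by
        apply String.toList_injective
        rw [← hrest, hz, hsl]
        simp [String.toList_append]
      exact hname ▸ hn
  · intro hmem
    refine ⟨_, hmem, ⟨?_, ?_, ?_⟩, pv_slice_render d _⟩
    · intro he
      have h2 := congrArg (fun x => x.toList.length) he
      simp [String.toList_append] at h2
    · intro he
      have h2 := congrArg (fun x => x.toList.length) he
      simp [String.toList_append] at h2
    · rw [Bool.and_eq_true, PySem.Str.startswith_eq, PySem.Str.endswith_eq,
        PySem.Chars.startswith_iff, PySem.Chars.endswith_iff]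
      exact ⟨⟨(PySem.Int.toStr (c : Int)).toList ++ [')'], by simp [String.toList_append]⟩,
        ⟨(d ++ " (imported " ++ PySem.Int.toStr (c : Int)).toList, by simp [String.toList_append]⟩⟩

-- with pointwise-equal loop conditions, B's mex loop equals A's probe loop
lemma pv_mex_eq_aloop (d : String) (ex : List String) (used : PySem.Set String)
    (h : ∀ c : Nat, PySem.Set.contains used (PySem.Int.toStr (c : Int)) = true ↔
        (d ++ " (imported " ++ PySem.Int.toStr (c : Int) ++ ")") ∈ ex) :
    ∀ fuel c, pvMex used fuel c = pvALoop d ex fuel c := by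
  intro fuel
  induction fuel with
  | zero => intro c; rfl
  | succ f ih =>
    intro c
    simp only [pvMex, pvALoop]
    by_cases hc : (d ++ " (imported " ++ PySem.Int.toStr (c : Int) ++ ")") ∈ ex
    · rw [if_pos ((h c).mpr hc), if_pos hc]
      exact ih (c + 1)
    · rw [if_neg (fun hb => hc ((h c).mp hb)), if_neg hc]

-- ===== VERDICT (by name: the statement is the Claim_ definition above) =====
theorem resolve_profile_name_collision_py_spec : Claim_equal_resolve_profile_name_collision_py := by
  intro d ex _
  show resolve_profile_name_collision_py d ex = resolve_profile_name_collision_py_alt d ex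
  unfold resolve_profile_name_collision_py resolve_profile_name_collision_py_alt pvFromIndex
  rw [pv_fold_bare, pv_fold_suff]
  by_cases hd : d ∈ ex
  · by_cases hc : (d ++ " (imported)") ∈ ex
    · simp only [hd, hc, decide_true, Bool.false_or, Bool.not_true, Bool.false_eq_true, if_false]
      have h : ∀ c : Nat,
          PySem.Set.contains
              ((ex.foldl (pvStep d (d ++ " (imported ")) (false, false, PySem.Set.empty)).2.2)
              (PySem.Int.toStr (c : Int)) = true ↔
            (d ++ " (imported " ++ PySem.Int.toStr (c : Int) ++ ")") ∈ ex := by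
        intro c
        rw [show ∀ (s : PySem.Set String) (x : String),
            (PySem.Set.contains s x = true) ↔ x ∈ s from fun s x => by simp [PySem.Set.contains]]
        exact pv_used_iff d ex c
      rw [pv_mex_eq_aloop d ex _ h]
      simp
    · simp [hd, hc]
  · simp [hd]
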